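-- pv_equiv track=rewrite | github.com/charl-potgieter/AustralianSchoolMaths | WebsiteCreator/site_hierarchies.py | _first_non_consecutive_like_item
-- ===== SOURCE A (Python) =====
-- def _first_non_consecutive_like_item(input_values: list[list[str]]
--                                      ) -> list[str]:
--     """Returns first item if it is an item in input_values that equals
--     another item in input_values but they do not appear consecutively,
--     otherwise returns empty list.
--     """
--
--     values_ex_consecutive_duplicates = []
--     for item in input_values:
--         if not values_ex_consecutive_duplicates:
--             values_ex_consecutive_duplicates.append(item)
--         elif item != values_ex_consecutive_duplicates[-1]:
--             values_ex_consecutive_duplicates.append(item)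
--             if values_ex_consecutive_duplicates.count(item) != 1:
--                 return item
--     return []
-- ===== SOURCE B (Python) =====
-- def _first_non_consecutive_like_item(input_values: list[list[str]]
--                                      ) -> list[str]:
--     """Two separate passes: first collapse runs of consecutive duplicates,
--     then scan the collapsed sequence with a 'seen' set and return the first
--     item already seen (a non-consecutive repeat), else []."""
--     collapsed = []
--     for item in input_values:
--         if not collapsed or item != collapsed[-1]:
--             collapsed.append(item)
--     seen = set()
--     for item in collapsed:
--         key = tuple(item)
--         if key in seen:
--             return item
--         seen.add(key)
--     return []
-- ===== Notes on version B (the rewrite author's own statement) =====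
-- stated objective: simpler
-- what changed: A's single fused loop that appends to the run-collapsed list and re-scans it with .count on every append is replaced by two sequential passes: build the run-collapsed sequence, then scan it once with a seen-set, returning the first already-seen item.
import Mathlib
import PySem

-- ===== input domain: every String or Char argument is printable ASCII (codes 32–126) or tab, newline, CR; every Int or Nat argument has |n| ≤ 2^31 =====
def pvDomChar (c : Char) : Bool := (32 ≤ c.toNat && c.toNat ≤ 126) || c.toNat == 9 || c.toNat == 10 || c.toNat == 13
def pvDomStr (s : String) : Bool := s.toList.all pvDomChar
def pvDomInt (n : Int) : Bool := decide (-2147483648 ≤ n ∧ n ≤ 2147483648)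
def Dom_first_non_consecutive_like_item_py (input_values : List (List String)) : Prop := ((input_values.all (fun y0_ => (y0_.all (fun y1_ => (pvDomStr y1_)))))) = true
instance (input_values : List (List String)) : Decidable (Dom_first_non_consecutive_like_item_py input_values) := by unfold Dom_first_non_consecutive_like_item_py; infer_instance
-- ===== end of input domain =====

-- B replaces A's fused loop (append to the run-collapsed list, re-scan it with .count
-- on every append) by two sequential passes: collapse runs, then scan with a seen-set. Objective: simpler.


-- ===== PORT A =====
-- the for-loop of A: `acc` is `values_ex_consecutive_duplicates`
def pvLoopA (acc : List (List String)) : List (List String) → List String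
  | [] => []
  | item :: rest =>
    if acc.isEmpty then
      pvLoopA (acc ++ [item]) rest
    else if PySem.List.pyGet? acc (-1) ≠ some item then
      let acc' := acc ++ [item]
      if PySem.List.count acc' item ≠ 1 then item
      else pvLoopA acc' rest
    else
      pvLoopA acc rest

def first_non_consecutive_like_item_py (input_values : List (List String)) : List String :=
  pvLoopA [] input_values

-- ===== PORT B =====
-- first pass of B: build the run-collapsed list (append when different from the last)
def pvCollapseB (acc : List (List String)) : List (List String) → List (List String)
  | [] => acc
  | item :: rest =>
    if acc.isEmpty || PySem.List.pyGet? acc (-1) ≠ some item then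
      pvCollapseB (acc ++ [item]) rest
    else
      pvCollapseB acc rest

-- second pass of B: first item already in `seen` (Python keys the set by tuple(item);
-- tuples of the item's strings are in bijection with the items, so the set holds the items)
def pvScanB (seen : PySem.Set (List String)) : List (List String) → List String
  | [] => []
  | item :: rest =>
    if seen.contains item then item
    else pvScanB (seen.add item) rest

def first_non_consecutive_like_item_py_alt (input_values : List (List String)) : List String :=
  pvScanB PySem.Set.empty (pvCollapseB [] input_values)

-- ===== PRECONDITION & SPEC =====
def Spec_first_non_consecutive_like_item_py (input_values : List (List String)) (out : List String) : Prop := out = first_non_consecutive_like_item_py_alt input_values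
instance (input_values : List (List String)) (out : List String) : Decidable (Spec_first_non_consecutive_like_item_py input_values out) := by unfold Spec_first_non_consecutive_like_item_py; infer_instance

-- ===== CLAIM (what is proved, stated in full; the proofs are below) =====
def Claim_equal_first_non_consecutive_like_item_py : Prop := ∀ (input_values : List (List String)), Dom_first_non_consecutive_like_item_py input_values → Spec_first_non_consecutive_like_item_py input_values (first_non_consecutive_like_item_py input_values)

-- ===== LEMMAS AND PROOFS =====

-- front-style run-collapse of `rest` given the last element `p` of the prefix built so far
def pvCTail (p : Option (List String)) : List (List String) → List (List String)
  | [] => []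
  | x :: r => if p = some x then pvCTail p r else x :: pvCTail (some x) r

theorem pvCollapseB_eq_ctail (rest : List (List String)) :
    ∀ acc, pvCollapseB acc rest = acc ++ pvCTail acc.getLast? rest := by
  induction rest with
  | nil => intro acc; simp [pvCollapseB, pvCTail]
  | cons x r ih =>
    intro acc
    by_cases h : acc.getLast? = some x
    · have hne : ¬ acc.isEmpty := by
        cases acc <;> simp_all
      simp [pvCollapseB, pvCTail, PySem.List.pyGet?_neg_one, h, hne, ih]
    · have hcond : (acc.isEmpty || decide (PySem.List.pyGet? acc (-1) ≠ some x)) = true := by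
        cases acc <;> simp_all [PySem.List.pyGet?_neg_one]
      simp only [pvCollapseB, pvCTail, h]
      rw [if_pos hcond, ih]
      simp

theorem ofList_append_singleton {α : Type} [BEq α] (xs : List α) (x : α) :
    PySem.Set.ofList (xs ++ [x]) = (PySem.Set.ofList xs).add x := by
  simp [PySem.Set.ofList_eq_foldl, List.foldl_append]

-- main invariant: continuing A from a duplicate-free nonempty collapsed prefix `acc`
-- equals B's scan of the remaining collapsed items with `seen` = the elements of `acc`
theorem pvLoopA_eq_scan (rest : List (List String)) :
    ∀ acc, acc ≠ [] → acc.Nodup →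
    pvLoopA acc rest = pvScanB (PySem.Set.ofList acc) (pvCTail acc.getLast? rest) := by
  induction rest with
  | nil => intro acc _ _; simp [pvLoopA, pvCTail, pvScanB]
  | cons x r ih =>
    intro acc hne hnd
    have hie : ¬ acc.isEmpty := by cases acc <;> simp_all
    by_cases h : acc.getLast? = some x
    · simp only [pvLoopA, PySem.List.pyGet?_neg_one, pvCTail, h, hie, Bool.false_eq_true,
        if_false, ite_not, if_true]
      have := ih acc hne hnd
      rw [h] at this
      simpa using this
    · have hcnt : PySem.List.count (acc ++ [x]) x = List.count x acc + 1 := by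
        simp [PySem.List.count_eq]
      simp only [pvLoopA, PySem.List.pyGet?_neg_one, pvCTail, h, hie, Bool.false_eq_true,
        if_false, ite_not]
      by_cases hmem : x ∈ acc
      · have h1 : ¬ (PySem.List.count (acc ++ [x]) x = 1) := by
          rw [hcnt]; have := List.count_pos_iff.mpr hmem; omega
        rw [if_neg h1]
        have hc : (PySem.Set.ofList acc).contains x = true := by
          simp [PySem.Set.contains, (PySem.Set.mem_ofList acc x).mpr hmem]
        simp only [pvScanB]
        rw [if_pos hc]
      · have h1 : PySem.List.count (acc ++ [x]) x = 1 := by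
          rw [hcnt, List.count_eq_zero_of_not_mem hmem]
        rw [if_pos h1]
        have hc : (PySem.Set.ofList acc).contains x = false := by
          have hx : x ∉ PySem.Set.ofList acc := fun hx => hmem ((PySem.Set.mem_ofList acc x).mp hx)
          simp_all [PySem.Set.contains]
        have hdisj : acc.Disjoint [x] := by
          intro a ha hax
          simp only [List.mem_singleton] at hax
          subst hax
          exact hmem ha
        have hnd2 : (acc ++ [x]).Nodup := hnd.append (List.nodup_singleton x) hdisj
        have := ih (acc ++ [x]) (by simp) hnd2
        rw [List.getLast?_append_cons] at this
        simp only [pvScanB, hc, Bool.false_eq_true, if_false]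
        rw [this, ofList_append_singleton]
        simp [PySem.Set.add]

-- ===== VERDICT (by name: the statement is the Claim_ definition above) =====
theorem first_non_consecutive_like_item_py_spec : Claim_equal_first_non_consecutive_like_item_py := by
  intro input_values _
  unfold Spec_first_non_consecutive_like_item_py
  unfold first_non_consecutive_like_item_py first_non_consecutive_like_item_py_alt
  cases input_values with
  | nil => simp [pvLoopA, pvCollapseB, pvScanB]
  | cons x r =>
    rw [pvCollapseB_eq_ctail]
    simp only [List.getLast?_nil, List.nil_append]
    show pvLoopA [] (x :: r) = pvScanB PySem.Set.empty (pvCTail none (x :: r))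
    have h1 : pvLoopA [] (x :: r) = pvLoopA [x] r := by simp [pvLoopA]
    have h2 : pvCTail (none : Option (List String)) (x :: r) = x :: pvCTail (some x) r := by
      simp [pvCTail]
    rw [h1, h2]
    have h3 : pvScanB PySem.Set.empty (x :: pvCTail (some x) r)
        = pvScanB (PySem.Set.ofList [x]) (pvCTail (some x) r) := by
      simp [pvScanB, PySem.Set.contains, PySem.Set.empty, PySem.Set.ofList_eq_foldl]
    rw [h3]
    have := pvLoopA_eq_scan r [x] (by simp) (by simp)
    simpa using this
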